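-- pv_equiv track=rewrite | github.com/luciamvm/todoist-python | report_CSV.py | organize_tasks
-- ===== SOURCE A (Python) =====
-- from collections import defaultdict
-- from operator import itemgetter
--
-- def organize_tasks(taskinformation):
--
--     # Dicionario com tasks agrupadas por categoria
--     by_category = defaultdict(list)
--     for info in taskinformation:
--         by_category[info[4]].append([info[0], info[1], info[2], info[3], info[4]])
--
--
--     # Tasks ordenadas pro data
--     ordered_tasks = []
--     for category, task in by_category.items():
--         ordered = sorted(task, key=itemgetter(0))
--         ordered_tasks.append(ordered)
--
--     return ordered_tasks
-- ===== SOURCE B (Python) =====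
-- def organize_tasks(taskinformation):
--     # Same grouping/sorting, decomposed as: truncate rows, dedup categories in
--     # first-seen order, then filter+sort per category (no dict of lists).
--     rows = [[info[0], info[1], info[2], info[3], info[4]] for info in taskinformation]
--     categories = list(dict.fromkeys(r[4] for r in rows))
--     return [sorted((r for r in rows if r[4] == c), key=lambda r: r[0]) for c in categories]
-- ===== Notes on version B (the rewrite author's own statement) =====
-- stated objective: alternative
-- what changed: Replaces the defaultdict-of-lists accumulation with a different decomposition: truncate every task to 5 fields, take the distinct categories in first-seen order with dict.fromkeys, and build each group by filtering and sorting per category; it trades the single grouping pass for a per-category scan.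
import Mathlib
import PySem

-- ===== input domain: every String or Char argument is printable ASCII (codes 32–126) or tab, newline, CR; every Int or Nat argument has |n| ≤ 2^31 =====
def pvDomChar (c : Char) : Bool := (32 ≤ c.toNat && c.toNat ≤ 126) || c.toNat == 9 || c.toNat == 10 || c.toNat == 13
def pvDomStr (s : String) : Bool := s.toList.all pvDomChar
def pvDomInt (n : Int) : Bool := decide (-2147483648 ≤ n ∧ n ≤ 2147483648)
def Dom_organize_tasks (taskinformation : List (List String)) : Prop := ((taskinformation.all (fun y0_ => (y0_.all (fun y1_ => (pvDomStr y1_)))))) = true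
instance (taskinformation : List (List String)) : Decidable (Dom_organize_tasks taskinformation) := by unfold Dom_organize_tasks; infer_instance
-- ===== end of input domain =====

-- B replaces A's defaultdict-of-lists accumulation by: truncate rows, dedup categories in
-- first-seen order, then filter+sort per category (alternative decomposition, similar cost).


-- ===== PORT A =====
-- info[i] for 0 ≤ i < len(info); Pre_ guarantees the index is in range, so getD "" is never taken
def pvGet (info : List String) (i : Int) : String := (PySem.List.pyGet? info i).getD ""

def organize_tasks (taskinformation : List (List String)) : List (List (List String)) :=
  -- by_category = defaultdict(list); by_category[info[4]].append([info[0],…,info[4]])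
  let by_category : PySem.Dict String (List (List String)) :=
    taskinformation.foldl (fun d info =>
      d.modify (pvGet info 4) []
        (· ++ [[pvGet info 0, pvGet info 1, pvGet info 2, pvGet info 3, pvGet info 4]]))
      PySem.Dict.empty
  -- for category, task in by_category.items(): ordered_tasks.append(sorted(task, key=itemgetter(0)))
  by_category.items.foldl (fun acc p =>
    acc ++ [PySem.List.sorted p.2 (fun r => pvGet r 0) false]) []

-- ===== PORT B =====

def organize_tasks_alt (taskinformation : List (List String)) : List (List (List String)) :=
  let rows := taskinformation.map (fun info =>
    [pvGet info 0, pvGet info 1, pvGet info 2, pvGet info 3, pvGet info 4])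
  let categories := PySem.List.dedup (rows.map (fun r => pvGet r 4))
  categories.map (fun c =>
    PySem.List.sorted (rows.filter (fun r => pvGet r 4 == c)) (fun r => pvGet r 0) false)

-- ===== PRECONDITION & SPEC =====
-- Python A raises IndexError on any task with fewer than 5 fields; exactly those inputs are excluded.
def Pre_organize_tasks (taskinformation : List (List String)) : Prop :=
  ∀ info ∈ taskinformation, 5 ≤ info.length
instance (taskinformation : List (List String)) : Decidable (Pre_organize_tasks taskinformation) := by unfold Pre_organize_tasks; infer_instance

def pvWitness_organize_tasks : List (List String) :=
  [["a", "b", "c", "d", "x"], ["e", "f", "g", "h", "y"], ["1", "2", "3", "4", "x"]]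

def Spec_organize_tasks (taskinformation : List (List String)) (out : List (List (List String))) : Prop := out = organize_tasks_alt taskinformation
instance (taskinformation : List (List String)) (out : List (List (List String))) : Decidable (Spec_organize_tasks taskinformation out) := by unfold Spec_organize_tasks; infer_instance

-- ===== CLAIM (what is proved, stated in full; the proofs are below) =====
def Claim_equal_organize_tasks : Prop := ∀ (taskinformation : List (List String)), Dom_organize_tasks taskinformation → Pre_organize_tasks taskinformation → Spec_organize_tasks taskinformation (organize_tasks taskinformation)

-- ===== LEMMAS AND PROOFS =====
theorem pvRow_get4 (a b c d e : String) : pvGet [a,b,c,d,e] 4 = e := rfl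

theorem organize_tasks_eq_alt (ti : List (List String)) :
    organize_tasks ti = organize_tasks_alt ti := by
  unfold organize_tasks organize_tasks_alt
  simp only [PySem.List.dedup]
  rw [PySem.List.foldl_append_singleton_eq_map, List.nil_append]
  rw [show (List.foldl (fun d info =>
        PySem.Dict.modify d (pvGet info 4) []
          (· ++ [[pvGet info 0, pvGet info 1, pvGet info 2, pvGet info 3, pvGet info 4]]))
        PySem.Dict.empty ti)
      = List.foldl (fun d p => PySem.Dict.modify d p.1 [] (· ++ [p.2])) PySem.Dict.empty
        (ti.map (fun info => (pvGet info 4,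
          [pvGet info 0, pvGet info 1, pvGet info 2, pvGet info 3, pvGet info 4])))
      from (List.foldl_map
        (f := fun info => (pvGet info 4,
          [pvGet info 0, pvGet info 1, pvGet info 2, pvGet info 3, pvGet info 4]))
        (g := fun d p => PySem.Dict.modify d p.1 [] (· ++ [p.2]))).symm]
  set l := ti.map (fun info => (pvGet info 4,
      [pvGet info 0, pvGet info 1, pvGet info 2, pvGet info 3, pvGet info 4])) with hl
  set d := List.foldl (fun d p => PySem.Dict.modify d p.1 [] (· ++ [p.2])) PySem.Dict.empty l with hd
  have hnd : d.keys.Nodup := by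
    rw [hd]
    exact PySem.Dict.nodup_keys_foldl_modify_key l
      (fun p : String × List String => p.1) []
      (fun _ p v => v ++ [p.2]) PySem.Dict.empty (by simp)
  have hkeys : d.keys = PySem.Set.ofList (ti.map (fun info => pvGet info 4)) := by
    rw [hd]
    rw [PySem.Dict.keys_foldl_modify_key l
      (fun p : String × List String => p.1) []
      (fun _ p v => v ++ [p.2]) PySem.Dict.empty]
    simp [hl, PySem.Set.update_nil_left, List.map_map, Function.comp_def]
  have hgetD : ∀ c, d.getD c [] = (ti.filter (fun info => pvGet info 4 == c)).map
      (fun info => [pvGet info 0, pvGet info 1, pvGet info 2, pvGet info 3, pvGet info 4]) := by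
    intro c
    rw [hd, PySem.Dict.getD_foldl_modify_append l PySem.Dict.empty c]
    simp [hl, List.filter_map, Function.comp_def, List.map_map]
  rw [PySem.Dict.items_eq_map_keys d hnd [], hkeys]
  simp only [List.map_map, Function.comp_def]
  apply List.map_congr_left
  intro c hc
  rw [hgetD c]
  rw [List.filter_map]
  simp only [Function.comp_def, pvRow_get4]

-- ===== VERDICT (by name: the statement is the Claim_ definition above) =====
theorem organize_tasks_spec : Claim_equal_organize_tasks := by
  intro ti _ _
  unfold Spec_organize_tasks
  exact organize_tasks_eq_alt ti
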